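-- pv_equiv track=rewrite | github.com/ceglab/MissingSquamateGenes | testMSA/ortholog_divergence_report_old.py | longest_contiguous_identity
-- ===== SOURCE A (Python) =====
-- def longest_contiguous_identity(aa_aln_q, aa_aln_t):
--     cur = best = 0
--     L = len(aa_aln_q)
--     for i in range(L):
--         if aa_aln_q[i] == aa_aln_t[i] and aa_aln_q[i] != "-":
--             cur += 1
--             if cur > best: best = cur
--         else:
--             cur = 0
--     return best
-- ===== SOURCE B (Python) =====
-- def longest_contiguous_identity(aa_aln_q, aa_aln_t):
--     flags = [aa_aln_q[i] == aa_aln_t[i] and aa_aln_q[i] != "-" for i in range(len(aa_aln_q))]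
--     runs = []
--     i = 0
--     while i < len(flags):
--         j = i
--         while j < len(flags) and flags[j] == flags[i]:
--             j += 1
--         if flags[i]:
--             runs.append(j - i)
--         i = j
--     best = 0
--     for r in runs:
--         if r > best:
--             best = r
--     return best
-- ===== Notes on version B (the rewrite author's own statement) =====
-- stated objective: alternative
-- what changed: B replaces A's running counter/best scan by a two-phase decomposition: build the per-position identity flag list, run-length-group it into maximal runs, and take the maximum true-run length.
import Mathlib
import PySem

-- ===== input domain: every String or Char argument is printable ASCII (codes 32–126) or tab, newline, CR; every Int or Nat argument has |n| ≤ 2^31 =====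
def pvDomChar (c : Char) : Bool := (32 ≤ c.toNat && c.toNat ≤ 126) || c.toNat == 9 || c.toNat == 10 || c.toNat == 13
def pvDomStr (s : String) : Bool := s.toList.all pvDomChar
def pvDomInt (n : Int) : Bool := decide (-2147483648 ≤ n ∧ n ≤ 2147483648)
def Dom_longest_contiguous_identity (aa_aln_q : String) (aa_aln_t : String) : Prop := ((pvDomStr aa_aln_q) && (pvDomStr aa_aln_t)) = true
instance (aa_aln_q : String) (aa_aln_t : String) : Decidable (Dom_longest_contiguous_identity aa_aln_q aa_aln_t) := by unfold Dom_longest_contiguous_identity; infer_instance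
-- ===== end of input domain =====

-- B replaces A's running counter/best scan by a two-phase decomposition (flag list, run-length
-- grouping, max true-run); return values agree on all inputs where A does not raise.

-- ===== PORT A =====
-- A: single pass with cur/best counters over range(len(aa_aln_q)).
def longest_contiguous_identity (aa_aln_q : String) (aa_aln_t : String) : Int :=
  let L := PySem.Str.len aa_aln_q
  let st := (PySem.List.pyRange 0 L 1).foldl (fun (st : Int × Int) i =>
    match PySem.Str.pyGet? aa_aln_q i, PySem.Str.pyGet? aa_aln_t i with
    | some cq, some ct =>
        if cq = ct ∧ cq ≠ '-' then
          let cur := st.1 + 1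
          (cur, if cur > st.2 then cur else st.2)
        else (0, st.2)
    | _, _ => st   -- IndexError in Python; excluded by Pre_
    ) ((0 : Int), (0 : Int))
  st.2

-- ===== PORT B =====
-- flags = [q[i] == t[i] and q[i] != "-" for i in range(len(q))]
def pvFlags (aa_aln_q : String) (aa_aln_t : String) : List Bool :=
  (PySem.List.pyRange 0 (PySem.Str.len aa_aln_q) 1).map (fun i =>
    match PySem.Str.pyGet? aa_aln_q i with
    | none => false   -- IndexError in Python; excluded by Pre_
    | some cq =>
        match PySem.Str.pyGet? aa_aln_t i with
        | none => false   -- IndexError in Python; excluded by Pre_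
        | some ct => decide (cq = ct ∧ cq ≠ '-'))

-- the grouping while-loop of Source B: each step consumes one maximal run of equal flags
-- (the inner 'while flags[j] == flags[i]' scan is takeWhile/dropWhile), keeping true-run lengths
def pvRuns : List Bool → List Int
  | [] => []
  | f :: l =>
      let k : Int := 1 + ((l.takeWhile (fun x => x == f)).length : Int)
      let rest := pvRuns (l.dropWhile (fun x => x == f))
      if f then k :: rest else rest
termination_by l => l.length
decreasing_by
  exact Nat.lt_succ_of_le (List.length_dropWhile_le _ _)

def longest_contiguous_identity_alt (aa_aln_q : String) (aa_aln_t : String) : Int :=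
  (pvRuns (pvFlags aa_aln_q aa_aln_t)).foldl (fun b r => if r > b then r else b) 0

-- ===== PRECONDITION & SPEC =====
-- A raises IndexError (and B does too) as soon as aa_aln_t is shorter than aa_aln_q; those inputs are excluded.
def Pre_longest_contiguous_identity (aa_aln_q : String) (aa_aln_t : String) : Prop :=
  aa_aln_q.toList.length ≤ aa_aln_t.toList.length
instance (aa_aln_q : String) (aa_aln_t : String) : Decidable (Pre_longest_contiguous_identity aa_aln_q aa_aln_t) := by unfold Pre_longest_contiguous_identity; infer_instance

def pvWitness_longest_contiguous_identity : String × String := ("AB-AA", "ABBAA")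

def Spec_longest_contiguous_identity (aa_aln_q : String) (aa_aln_t : String) (out : Int) : Prop := out = longest_contiguous_identity_alt aa_aln_q aa_aln_t
instance (aa_aln_q : String) (aa_aln_t : String) (out : Int) : Decidable (Spec_longest_contiguous_identity aa_aln_q aa_aln_t out) := by unfold Spec_longest_contiguous_identity; infer_instance

-- ===== CLAIM (what is proved, stated in full; the proofs are below) =====
def Claim_equal_longest_contiguous_identity : Prop := ∀ (aa_aln_q : String) (aa_aln_t : String), Dom_longest_contiguous_identity aa_aln_q aa_aln_t → Pre_longest_contiguous_identity aa_aln_q aa_aln_t → Spec_longest_contiguous_identity aa_aln_q aa_aln_t (longest_contiguous_identity aa_aln_q aa_aln_t)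

-- ===== LEMMAS AND PROOFS =====

-- the maximal true-run length of a flag list, seen from a running counter c (proof abstraction)
def pvBmax (c : Int) : List Bool → Int
  | [] => c
  | true :: l => pvBmax (c + 1) l
  | false :: l => max c (pvBmax 0 l)

lemma pvBmax_ge (l : List Bool) : ∀ c : Int, c ≤ pvBmax c l := by
  induction l with
  | nil => intro c; simp [pvBmax]
  | cons f l ih =>
      intro c
      cases f
      · simp [pvBmax]
      · calc c ≤ c + 1 := by omega
          _ ≤ pvBmax (c + 1) l := ih _

-- A's pair fold, read off the flag list, computes max best (pvBmax cur flags)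
lemma pvAfold (l : List Bool) : ∀ c b : Int, 0 ≤ c → c ≤ b →
    (l.foldl (fun (st : Int × Int) f =>
      if f then (st.1 + 1, if st.1 + 1 > st.2 then st.1 + 1 else st.2) else (0, st.2))
      (c, b)).2 = max b (pvBmax c l) := by
  induction l with
  | nil => intro c b _ hcb; simp [pvBmax]; omega
  | cons f l ih =>
      intro c b hc hcb
      cases f
      · have h := ih 0 b (by omega) (by omega)
        simp only [List.foldl_cons, if_neg (by simp : ¬ (false = true))] at *
        rw [h]
        have := pvBmax_ge l (0 : Int)
        simp [pvBmax]
        omega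
      · have hmax : (if c + 1 > b then c + 1 else b) = max b (c + 1) := by omega
        have h := ih (c + 1) (max b (c + 1)) (by omega) (by omega)
        simp only [List.foldl_cons, if_true]
        rw [hmax, h]
        have := pvBmax_ge l (c + 1)
        simp [pvBmax]
        omega

-- splitting pvBmax at the leading true-run
lemma pvBmax_split (l : List Bool) : ∀ c : Int, 0 ≤ c →
    pvBmax c l = max (c + ((l.takeWhile (fun x => x == true)).length : Int))
                     (pvBmax 0 (l.dropWhile (fun x => x == true))) := by
  induction l with
  | nil => intro c hc; simp [pvBmax]; omega
  | cons f l ih =>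
      intro c hc
      cases f
      · have := pvBmax_ge l (0 : Int)
        simp [pvBmax, List.takeWhile, List.dropWhile]
        omega
      · have h := ih (c + 1) (by omega)
        simp [pvBmax, List.takeWhile, List.dropWhile, h]
        omega

lemma pvBmax_zero_dropFalse (l : List Bool) :
    pvBmax 0 (l.dropWhile (fun x => x == false)) = pvBmax 0 l := by
  induction l with
  | nil => rfl
  | cons f l ih =>
      cases f
      · have := pvBmax_ge l (0 : Int)
        have hstep : (false :: l).dropWhile (fun x => x == false) = l.dropWhile (fun x => x == false) := by
          simp [List.dropWhile]
        rw [hstep, ih]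
        simp [pvBmax]
        omega
      · simp [List.dropWhile]

-- B's max-of-runs fold equals max b (pvBmax 0 flags)
lemma pvBfold (n : Nat) : ∀ l : List Bool, l.length ≤ n → ∀ b : Int, 0 ≤ b →
    ((pvRuns l).foldl (fun b r => if r > b then r else b) b) = max b (pvBmax 0 l) := by
  induction n with
  | zero =>
      intro l hl b hb
      have : l = [] := List.eq_nil_of_length_eq_zero (by omega)
      subst this; simp [pvRuns, pvBmax]; omega
  | succ n ih =>
      intro l hl b hb
      cases l with
      | nil => simp [pvRuns, pvBmax]; omega
      | cons f l =>
          have hdw : (l.dropWhile (fun x => x == f)).length ≤ n :=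
            le_trans (List.length_dropWhile_le _ _) (by simpa using Nat.lt_succ_iff.mp (by simpa using hl))
          cases f
          · -- false head: runs of the tail after the false run
            have h := ih (l.dropWhile (fun x => x == false)) hdw b hb
            simp only [pvRuns, Bool.false_eq_true, if_false]
            rw [h, pvBmax_zero_dropFalse]
            have := pvBmax_ge l (0 : Int)
            simp [pvBmax]
            omega
          · -- true head: first run length 1 + takeWhile, rest
            have hstep : (if (1 + ((l.takeWhile (fun x => x == true)).length : Int)) > b then
                (1 + ((l.takeWhile (fun x => x == true)).length : Int)) else b)
                = max b (1 + ((l.takeWhile (fun x => x == true)).length : Int)) := by omega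
            have h := ih (l.dropWhile (fun x => x == true)) hdw
              (max b (1 + ((l.takeWhile (fun x => x == true)).length : Int)))
              (by omega)
            simp only [pvRuns, if_true]
            simp only [List.foldl_cons]
            rw [hstep, h]
            have h01 : pvBmax 0 (true :: l) = pvBmax 1 l := rfl
            rw [h01, pvBmax_split l 1 (by omega)]
            omega

-- A's fold over indices equals the pair fold over the flag list (under Pre_)
lemma pvA_flags (aa_aln_q aa_aln_t : String)
    (hpre : aa_aln_q.toList.length ≤ aa_aln_t.toList.length) :
    longest_contiguous_identity aa_aln_q aa_aln_t =
    ((pvFlags aa_aln_q aa_aln_t).foldl (fun (st : Int × Int) f =>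
      if f then (st.1 + 1, if st.1 + 1 > st.2 then st.1 + 1 else st.2) else (0, st.2))
      ((0 : Int), (0 : Int))).2 := by
  have hcongr : ∀ (st : Int × Int), ∀ i ∈ PySem.List.pyRange 0 (PySem.Str.len aa_aln_q) 1,
      (match PySem.Str.pyGet? aa_aln_q i, PySem.Str.pyGet? aa_aln_t i with
       | some cq, some ct =>
           if cq = ct ∧ cq ≠ '-' then (st.1 + 1, if st.1 + 1 > st.2 then st.1 + 1 else st.2)
           else (0, st.2)
       | _, _ => st)
      = (if (match PySem.Str.pyGet? aa_aln_q i with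
             | none => false
             | some cq =>
                 match PySem.Str.pyGet? aa_aln_t i with
                 | none => false
                 | some ct => decide (cq = ct ∧ cq ≠ '-')) = true
         then (st.1 + 1, if st.1 + 1 > st.2 then st.1 + 1 else st.2) else (0, st.2)) := by
    intro st i hi
    have hmem := (PySem.List.mem_pyRange_one).mp hi
    simp only [PySem.Str.len_eq] at hmem
    have hq := PySem.List.pyGet?_eq_some_getElem (xs := aa_aln_q.toList) hmem.1 hmem.2
    have ht := PySem.List.pyGet?_eq_some_getElem (xs := aa_aln_t.toList) hmem.1 (by omega)
    simp only [PySem.Str.pyGet?_eq, PySem.Chars.pyGet?_eq_listPyGet?, hq, ht]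
    by_cases hcond : aa_aln_q.toList[i.toNat] = aa_aln_t.toList[i.toNat] ∧ aa_aln_q.toList[i.toNat] ≠ '-'
    · simp [hcond]
    · simp [hcond]
  unfold longest_contiguous_identity pvFlags
  rw [List.foldl_map]
  exact congrArg Prod.snd (PySem.List.foldl_congr_mem _ _ _ _ (by
    intro acc x hx
    exact hcongr acc x hx))

-- ===== VERDICT (by name: the statement is the Claim_ definition above) =====
theorem longest_contiguous_identity_spec : Claim_equal_longest_contiguous_identity := by
  intro q t _ hpre
  unfold Spec_longest_contiguous_identity longest_contiguous_identity_alt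
  rw [pvA_flags q t hpre,
      pvAfold (pvFlags q t) 0 0 (by omega) (by omega),
      pvBfold (pvFlags q t).length (pvFlags q t) le_rfl 0 (by omega)]
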